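-- pv_equiv track=rewrite | github.com/BartoszGondek/prg-basics | 10-Test2/MockTest2/p10.py | f
-- ===== SOURCE A (Python) =====
-- def f(array):
--     smallest_value = array[0][0]
--     smallest_row, smallest_col = 0, 0
--
--     for i in range(len(array)):
--         for j in range(len(array[i])):
--             if array[i][j] < smallest_value:
--                 smallest_value = array[i][j]
--                 smallest_row, smallest_col = i, j
--
--     return smallest_row == smallest_col
-- ===== SOURCE B (Python) =====
-- def f(array):
--     # Pass 1: global minimum of all elements (min() over a flattened generator).
--     m = min(x for row in array for x in row)
--     # Pass 2: first position (row-major) holding the minimum; strict '<' in A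
--     # keeps the earliest minimum, so this is the same position.
--     for i, row in enumerate(array):
--         for j, x in enumerate(row):
--             if x == m:
--                 return i == j
-- ===== Notes on version B (the rewrite author's own statement) =====
-- stated objective: idiomatic
-- what changed: Replaces the running-minimum state machine (value + tracked row/col updated in a nested index loop) by two plain passes: min() over a flattened generator, then an enumerate scan that returns at the first occurrence of that minimum.
import Mathlib
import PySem

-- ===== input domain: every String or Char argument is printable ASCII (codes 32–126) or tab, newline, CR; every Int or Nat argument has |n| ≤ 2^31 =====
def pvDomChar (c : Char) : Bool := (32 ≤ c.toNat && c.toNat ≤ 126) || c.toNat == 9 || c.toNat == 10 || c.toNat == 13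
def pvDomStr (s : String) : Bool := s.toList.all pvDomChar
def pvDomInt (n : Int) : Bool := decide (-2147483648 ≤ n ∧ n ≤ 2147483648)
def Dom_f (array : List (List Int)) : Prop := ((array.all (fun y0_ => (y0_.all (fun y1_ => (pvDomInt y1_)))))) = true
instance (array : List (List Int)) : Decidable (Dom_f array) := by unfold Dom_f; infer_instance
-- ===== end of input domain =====

-- B replaces A's running-minimum state machine by two plain passes (min over the
-- flattened matrix, then a scan for its first occurrence); same cost, more idiomatic.

-- ===== PORT A =====
-- A: running minimum with tracked (row, col), strict '<' keeps the earliest minimum.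
-- the loop of A: state (smallest_value, smallest_row, smallest_col)
def fRun (array : List (List Int)) : Int × Int × Int :=
  (PySem.List.enumerate array 0).foldl
    (fun s p =>
      (PySem.List.enumerate p.2 0).foldl
        (fun (s : Int × Int × Int) q => if q.2 < s.1 then (q.2, p.1, q.1) else s) s)
    (((PySem.List.pyGet? array 0).bind (fun r => PySem.List.pyGet? r 0)).getD 0, 0, 0)

def f (array : List (List Int)) : Bool :=
  decide ((fRun array).2.1 = (fRun array).2.2)

-- ===== PORT B =====
-- B: m = min of the flattened matrix; return at the first row-major position holding m.
def f_alt (array : List (List Int)) : Bool :=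
  match PySem.List.min? (array.flatMap id) (fun x => x) with
  | none => false
  | some m =>
    ((PySem.List.enumerate array 0).findSome? (fun p =>
        (PySem.List.enumerate p.2 0).findSome? (fun q =>
          if q.2 = m then some (decide (p.1 = q.1)) else none))).getD false

-- ===== PRECONDITION & SPEC =====
-- Pre_ excludes exactly the inputs where A raises IndexError on array[0][0]
-- (empty outer list or empty first row).
def Pre_f (array : List (List Int)) : Prop := array ≠ [] ∧ array.headI ≠ []
instance (array : List (List Int)) : Decidable (Pre_f array) := by unfold Pre_f; infer_instance
def pvWitness_f : List (List Int) := [[3, 1], [0, 5]]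

def Spec_f (array : List (List Int)) (out : Bool) : Prop := out = f_alt array
instance (array : List (List Int)) (out : Bool) : Decidable (Spec_f array out) := by unfold Spec_f; infer_instance

-- ===== CLAIM (what is proved, stated in full; the proofs are below) =====
def Claim_equal_f : Prop := ∀ (array : List (List Int)), Dom_f array → Pre_f array → Spec_f array (f array)

-- ===== LEMMAS AND PROOFS =====

-- the flattened row-major list of ((row, col), value)
def pvIdx (L : List (Int × List Int)) : List ((Int × Int) × Int) :=
  L.flatMap (fun p => (PySem.List.enumerate p.2 0).map (fun q => ((p.1, q.1), q.2)))

def pvStep (s : Int × Int × Int) (e : (Int × Int) × Int) : Int × Int × Int :=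
  if e.2 < s.1 then (e.2, e.1.1, e.1.2) else s

lemma pvIdx_cons (p : Int × List Int) (L : List (Int × List Int)) :
    pvIdx (p :: L) = (PySem.List.enumerate p.2 0).map (fun q => ((p.1, q.1), q.2)) ++ pvIdx L := by
  simp [pvIdx]

-- A's nested fold is the fold of pvStep over the flattened list
lemma pvFoldA (L : List (Int × List Int)) (s : Int × Int × Int) :
    L.foldl (fun s p =>
        (PySem.List.enumerate p.2 0).foldl
          (fun (s : Int × Int × Int) q => if q.2 < s.1 then (q.2, p.1, q.1) else s) s) s
      = (pvIdx L).foldl pvStep s := by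
  induction L generalizing s with
  | nil => simp [pvIdx]
  | cons p L ih =>
      simp only [List.foldl_cons, pvIdx_cons, List.foldl_append, List.foldl_map, ih]
      rfl

-- B's nested findSome? is a findSome? over the flattened list
lemma pvFindB (m : Int) (L : List (Int × List Int)) :
    L.findSome? (fun p =>
        (PySem.List.enumerate p.2 0).findSome? (fun q =>
          if q.2 = m then some (decide (p.1 = q.1)) else none))
      = (pvIdx L).findSome? (fun e => if e.2 = m then some (decide (e.1.1 = e.1.2)) else none) := by
  induction L with
  | nil => simp [pvIdx]
  | cons p L ih =>
      simp only [List.findSome?_cons, pvIdx_cons, List.findSome?_append, List.findSome?_map, ih]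
      cases h : (PySem.List.enumerate p.2 0).findSome?
          (fun q => if q.2 = m then some (decide (p.1 = q.1)) else none) with
      | none =>
          rw [show ((PySem.List.enumerate p.2 0).findSome?
            ((fun e => if e.2 = m then some (decide (e.1.1 = e.1.2)) else none) ∘
              (fun q => ((p.1, q.1), q.2)))) = none from by simpa [Function.comp] using h]
          simp
      | some b =>
          rw [show ((PySem.List.enumerate p.2 0).findSome?
            ((fun e => if e.2 = m then some (decide (e.1.1 = e.1.2)) else none) ∘
              (fun q => ((p.1, q.1), q.2)))) = some b from by simpa [Function.comp] using h]
          simp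

-- guarded findSome? = find? then map
lemma pvFindSome_guard {α β : Type} (p : α → Prop) [DecidablePred p] (g : α → β) (l : List α) :
    l.findSome? (fun e => if p e then some (g e) else none)
      = (l.find? (fun e => decide (p e))).map g := by
  induction l with
  | nil => simp
  | cons a l ih =>
      by_cases h : p a <;> simp [h, ih]

lemma pvFoldMin_le (l : List Int) (v : Int) : l.foldl min v ≤ v := by
  induction l generalizing v with
  | nil => simp
  | cons a l ih => exact le_trans (ih (min v a)) (min_le_left _ _)

lemma pvFoldMin_mem (l : List Int) (v : Int) : l.foldl min v = v ∨ l.foldl min v ∈ l := by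
  induction l generalizing v with
  | nil => simp
  | cons a l ih =>
      rcases ih (min v a) with h | h
      · by_cases hva : v ≤ a
        · left; simp only [List.foldl_cons, h]; omega
        · right; rw [List.mem_cons]; left; simp only [List.foldl_cons, h]; omega
      · right; rw [List.mem_cons]; right; simpa using h

-- running minimum: the final position is the first position holding the minimum
-- (or the initial position if nothing beats the initial value)
lemma pvRunPos (l : List ((Int × Int) × Int)) (v : Int) (p : Int × Int) :
    (l.foldl pvStep (v, p)).2 =
      if (l.map Prod.snd).foldl min v < v then
        (((l.find? (fun e => decide (e.2 = (l.map Prod.snd).foldl min v))).map Prod.fst).getD p)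
      else p := by
  induction l generalizing v p with
  | nil => simp
  | cons e l ih
  =>
      have hle : (l.map Prod.snd).foldl min e.2 ≤ e.2 := pvFoldMin_le _ _
      simp only [List.foldl_cons, List.map_cons, pvStep]
      by_cases h : e.2 < v
      · simp only [if_pos h]
        rw [ih]
        have hmin : min v e.2 = e.2 := by omega
        simp only [hmin]
        have hcond : (l.map Prod.snd).foldl min e.2 < v := lt_of_le_of_lt hle h
        rw [if_pos hcond]
        by_cases he : e.2 = (l.map Prod.snd).foldl min e.2
        · rw [List.find?_cons_of_pos (by simpa using he)]
          rw [if_neg (by omega)]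
          rfl
        · rw [List.find?_cons_of_neg (by simpa using he)]
          have hlt : (l.map Prod.snd).foldl min e.2 < e.2 := lt_of_le_of_ne hle (Ne.symm he)
          rw [if_pos hlt]
          have hmem : (l.map Prod.snd).foldl min e.2 ∈ l.map Prod.snd := by
            rcases pvFoldMin_mem (l.map Prod.snd) e.2 with h' | h'
            · omega
            · exact h'
          obtain ⟨w, hw, hw2⟩ := List.mem_map.1 hmem
          cases hf : l.find? (fun e_1 => decide (e_1.2 = (l.map Prod.snd).foldl min e.2)) with
          | none =>
              have := List.find?_eq_none.1 hf w hw
              simp [hw2] at this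
          | some e' => rfl
      · simp only [if_neg h]
        rw [ih]
        have hmin : min v e.2 = v := by omega
        simp only [hmin]
        by_cases hc : (l.map Prod.snd).foldl min v < v
        · rw [if_pos hc, if_pos hc]
          rw [List.find?_cons_of_neg (by simp; omega)]
        · rw [if_neg hc, if_neg hc]

-- values of the flattened indexed list are the flattened matrix
lemma pvIdx_snd (L : List (Int × List Int)) :
    (pvIdx L).map Prod.snd = L.flatMap Prod.snd := by
  induction L with
  | nil => simp [pvIdx]
  | cons p L ih =>
      simp only [pvIdx_cons, List.map_append, List.map_map, ih, List.flatMap_cons]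
      congr 1
      exact PySem.List.map_snd_enumerate p.2 0

lemma pvEnum_flat (array : List (List Int)) :
    (PySem.List.enumerate array 0).flatMap Prod.snd = array.flatMap id := by
  induction array with
  | nil => simp
  | cons r rs ih =>
      simp only [PySem.List.enumerate_cons, List.flatMap_cons]
      congr 1
      -- flatMap snd over an enumeration is independent of the start index
      have key : ∀ (l : List (List Int)) (s t : Int),
          (PySem.List.enumerate l s).flatMap Prod.snd = (PySem.List.enumerate l t).flatMap Prod.snd := by
        intro l
        induction l with
        | nil => simp
        | cons a l ihl =>
            intro s t
            simp only [PySem.List.enumerate_cons, List.flatMap_cons]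
            rw [ihl (s + 1) (t + 1)]
      rw [key rs (0 + 1) 0, ih]

lemma pvGet_cons_zero {α : Type} (a : α) (l : List α) : PySem.List.pyGet? (a :: l) 0 = some a := by
  simp [PySem.List.pyGet?, PySem.List.pyIdx?]

-- the main equivalence
lemma pvMain (rs : List (List Int)) (x : Int) (xs : List Int) :
    f ((x :: xs) :: rs) = f_alt ((x :: xs) :: rs) := by
  set rest := (PySem.List.enumerate xs 1).map (fun q => (((0 : Int), q.1), q.2))
      ++ pvIdx (PySem.List.enumerate rs 1) with hrest
  have hidx : pvIdx (PySem.List.enumerate ((x :: xs) :: rs) 0)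
      = ((0, 0), x) :: rest := by
    simp [PySem.List.enumerate_cons, pvIdx_cons, hrest]
  have hflat : ((x :: xs) :: rs).flatMap id = x :: rest.map Prod.snd := by
    have h1 := pvIdx_snd (PySem.List.enumerate ((x :: xs) :: rs) 0)
    rw [hidx] at h1
    rw [← pvEnum_flat, ← h1]
    simp
  set M := (rest.map Prod.snd).foldl min x with hM
  have hMle : M ≤ x := pvFoldMin_le _ _
  -- compute f
  have hrun : fRun ((x :: xs) :: rs) = rest.foldl pvStep (x, 0, 0) := by
    unfold fRun
    rw [pvFoldA, hidx]
    simp only [pvGet_cons_zero, Option.bind_some, Option.getD_some, List.foldl_cons, pvStep]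
    rw [if_neg (by omega)]
  have hA : f ((x :: xs) :: rs)
      = decide ((rest.foldl pvStep (x, 0, 0)).2.1 = (rest.foldl pvStep (x, 0, 0)).2.2) := by
    unfold f
    rw [hrun]
  -- compute f_alt
  have hB : f_alt ((x :: xs) :: rs)
      = ((((0, 0), x) :: rest).findSome?
          (fun e => if e.2 = M then some (decide (e.1.1 = e.1.2)) else none)).getD false := by
    unfold f_alt
    rw [hflat, PySem.List.min?_id_cons]
    show ((PySem.List.enumerate ((x :: xs) :: rs) 0).findSome? (fun p =>
        (PySem.List.enumerate p.2 0).findSome? (fun q =>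
          if q.2 = M then some (decide (p.1 = q.1)) else none))).getD false = _
    rw [pvFindB, hidx]
  rw [hA, hB]
  rw [pvRunPos]
  by_cases hlt : M < x
  · rw [if_pos (by rw [← hM]; exact hlt)]
    rw [List.findSome?_cons]
    rw [if_neg (by omega)]
    rw [pvFindSome_guard (fun e => e.2 = M) (fun e => decide (e.1.1 = e.1.2)) rest]
    have hxm : M = x ∨ M ∈ rest.map Prod.snd := pvFoldMin_mem _ _
    have hmem : M ∈ rest.map Prod.snd := by
      rcases hxm with h | h
      · omega
      · exact h
    obtain ⟨e, he, he2⟩ := List.mem_map.1 hmem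
    have hfind : ∃ e', rest.find? (fun e => decide (e.2 = M)) = some e' := by
      cases hf : rest.find? (fun e => decide (e.2 = M)) with
      | none =>
          exfalso
          have := List.find?_eq_none.1 hf e he
          simp [he2] at this
      | some e' => exact ⟨e', rfl⟩
    obtain ⟨e', hfind⟩ := hfind
    rw [← hM, hfind]
    simp
  · rw [if_neg (by rw [← hM]; exact hlt)]
    have hxM : x = M := by omega
    rw [List.findSome?_cons]
    simp only [hxM]
    simp

-- ===== VERDICT (by name: the statement is the Claim_ definition above) =====
theorem f_spec : Claim_equal_f := by
  intro array _ hpre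
  unfold Spec_f
  obtain ⟨hne, hh⟩ := hpre
  cases array with
  | nil => exact absurd rfl hne
  | cons r0 rs =>
      cases hr : r0 with
      | nil => simp [List.headI, hr] at hh
      | cons x xs =>
          subst hr
          exact pvMain rs x xs
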